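-- pv_equiv track=rewrite | github.com/benActor/Markov_Decision | node.py | rem_dupli
-- ===== SOURCE A (Python) =====
-- def rem_dupli(trans_list):
--     dupli = []
--     unique = []
--     for i in range(len(trans_list)):
--         if trans_list[i] in trans_list[i + 1:] or trans_list[i] in dupli:
--             dupli.append(trans_list[i])
--         else:
--             unique.append(trans_list[i])
--     if dupli:
--         return [dupli[0]] + unique
--     return unique
-- ===== SOURCE B (Python) =====
-- def rem_dupli(trans_list):
--     cnt = {}
--     for x in trans_list:
--         cnt[x] = cnt.get(x, 0) + 1
--     unique = [x for x in trans_list if cnt[x] == 1]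
--     first_dup = next((x for x in trans_list if cnt[x] > 1), None)
--     if first_dup is not None:
--         return [first_dup] + unique
--     return unique
-- ===== Notes on version B (the rewrite author's own statement) =====
-- stated objective: faster
-- what changed: Replaces A's per-element scan of the rest of the list (and of the growing dupli list) with a single frequency-table pass: unique is one filter by count==1 and the first duplicate is found by one scan, removing all inner scans.
import Mathlib
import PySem

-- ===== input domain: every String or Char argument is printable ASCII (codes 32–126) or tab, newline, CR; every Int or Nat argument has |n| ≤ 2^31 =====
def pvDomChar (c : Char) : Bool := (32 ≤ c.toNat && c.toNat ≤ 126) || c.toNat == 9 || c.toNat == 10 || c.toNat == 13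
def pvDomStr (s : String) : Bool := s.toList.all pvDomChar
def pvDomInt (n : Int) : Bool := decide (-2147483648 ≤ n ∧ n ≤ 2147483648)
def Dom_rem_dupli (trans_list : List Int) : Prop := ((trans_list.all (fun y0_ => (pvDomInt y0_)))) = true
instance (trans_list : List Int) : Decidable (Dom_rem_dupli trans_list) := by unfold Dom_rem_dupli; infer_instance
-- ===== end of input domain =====

-- B replaces A's per-element rescans of the rest of the list with one frequency table
-- plus one filter and one scan (objective: faster).

-- ===== PORT A =====
def rem_dupli (trans_list : List Int) : List Int :=
  let s := (PySem.List.pyRange 0 (trans_list.length : Int) 1).foldl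
    (fun (s : List Int × List Int) i =>
      if PySem.List.pyGetD trans_list i 0 ∈ PySem.List.slice trans_list (some (i + 1)) none
         ∨ PySem.List.pyGetD trans_list i 0 ∈ s.1 then
        (s.1 ++ [PySem.List.pyGetD trans_list i 0], s.2)
      else
        (s.1, s.2 ++ [PySem.List.pyGetD trans_list i 0]))
    ([], [])
  if s.1 ≠ [] then [PySem.List.pyGetD s.1 0 0] ++ s.2 else s.2

-- ===== PORT B =====
def rem_dupli_alt (trans_list : List Int) : List Int :=
  let cnt : PySem.Dict Int Int :=
    trans_list.foldl (fun d x => d.insert x (d.getD x 0 + 1)) PySem.Dict.empty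
  let unique := trans_list.filter (fun x => cnt.getD x 0 == 1)
  match trans_list.find? (fun x => 1 < cnt.getD x 0) with
  | some d => [d] ++ unique
  | none => unique

-- ===== PRECONDITION & SPEC =====
def Spec_rem_dupli (trans_list : List Int) (out : List Int) : Prop := out = rem_dupli_alt trans_list
instance (trans_list : List Int) (out : List Int) : Decidable (Spec_rem_dupli trans_list out) := by unfold Spec_rem_dupli; infer_instance

-- ===== CLAIM (what is proved, stated in full; the proofs are below) =====
def Claim_equal_rem_dupli : Prop := ∀ (trans_list : List Int), Dom_rem_dupli trans_list → Spec_rem_dupli trans_list (rem_dupli trans_list)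

-- ===== LEMMAS AND PROOFS =====

-- B's counting loop builds the occurrence counts of the list.
lemma getD_countLoop (l : List Int) (d : PySem.Dict Int Int) (x : Int) :
    (l.foldl (fun d x => d.insert x (d.getD x 0 + 1)) d).getD x 0
      = d.getD x 0 + l.count x := by
  induction l generalizing d with
  | nil => simp
  | cons h t ih =>
    simp only [List.foldl_cons, ih, PySem.Dict.getD_insert, List.count_cons]
    by_cases hx : x = h <;> simp [hx] <;> omega

-- A's main loop: every occurrence of an element that occurs at least twice goes to
-- dupli, every occurrence of an element that occurs once goes to unique.
lemma loopA (l : List Int) : ∀ (k i : Nat) (d u : List Int), l.length - i = k →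
    (∀ x, x ∈ d ↔ (x ∈ l.take i ∧ 2 ≤ l.count x)) →
    ((PySem.List.pyRange (i : Int) (l.length : Int) 1).foldl
      (fun (s : List Int × List Int) j =>
        if PySem.List.pyGetD l j 0 ∈ PySem.List.slice l (some (j + 1)) none
           ∨ PySem.List.pyGetD l j 0 ∈ s.1 then
          (s.1 ++ [PySem.List.pyGetD l j 0], s.2)
        else
          (s.1, s.2 ++ [PySem.List.pyGetD l j 0])) (d, u))
    = (d ++ (l.drop i).filter (fun x => decide (2 ≤ l.count x)),
       u ++ (l.drop i).filter (fun x => decide (l.count x = 1))) := by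
  intro k
  induction k with
  | zero =>
    intro i d u hik hd
    have hi : l.length ≤ i := by omega
    rw [PySem.List.pyRange_one_eq_nil (by exact_mod_cast hi)]
    simp [List.drop_eq_nil_of_le hi]
  | succ k ih =>
    intro i d u hik hd
    have hi : i < l.length := by omega
    rw [PySem.List.pyRange_one_cons (by exact_mod_cast hi)]
    simp only [List.foldl_cons]
    have hx : PySem.List.pyGetD l (i : Int) 0 = l[i] := by
      simp [PySem.List.pyGetD_natCast, List.getElem?_eq_getElem hi]
    have hsl : PySem.List.slice l (some ((i : Int) + 1)) none = l.drop (i + 1) := by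
      have h1 : ((i : Int) + 1) = ((i + 1 : Nat) : Int) := by push_cast; ring
      rw [h1, PySem.List.slice_from_natCast]
    have hdropi : l.drop i = l[i] :: l.drop (i + 1) := List.drop_eq_getElem_cons hi
    have hcount : ∀ y, l.count y = (l.take i).count y + (l[i] :: l.drop (i + 1)).count y := by
      intro y
      conv_lhs => rw [← List.take_append_drop i l, hdropi]
      rw [List.count_append]
    have hcnt2 : l.count l[i] = (l.take i).count l[i] + 1 + (l.drop (i + 1)).count l[i] := by
      rw [hcount l[i], List.count_cons_self]
      ring
    have hcond : (l[i] ∈ l.drop (i + 1) ∨ l[i] ∈ d) ↔ 2 ≤ l.count l[i] := by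
      constructor
      · rintro (h | h)
        · have := List.count_pos_iff.mpr h
          omega
        · exact ((hd l[i]).1 h).2
      · intro h2
        by_cases hm : l[i] ∈ l.drop (i + 1)
        · exact Or.inl hm
        · right
          have hc0 : (l.drop (i + 1)).count l[i] = 0 := List.count_eq_zero.mpr hm
          have hp : 0 < (l.take i).count l[i] := by omega
          exact (hd l[i]).2 ⟨List.count_pos_iff.mp hp, h2⟩
    have htake : l.take (i + 1) = l.take i ++ [l[i]] := by
      rw [List.take_add_one]
      simp [List.getElem?_eq_getElem hi]
    rw [hx, hsl]
    by_cases h2 : 2 ≤ l.count l[i]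
    · rw [if_pos (hcond.mpr h2)]
      have hinv : ∀ y, y ∈ d ++ [l[i]] ↔ (y ∈ l.take (i + 1) ∧ 2 ≤ l.count y) := by
        intro y
        simp only [List.mem_append, List.mem_singleton, htake, hd]
        constructor
        · rintro (⟨hy, hc⟩ | rfl)
          · exact ⟨Or.inl hy, hc⟩
          · exact ⟨Or.inr (by simp), h2⟩
        · rintro ⟨hy | hy, hc⟩
          · exact Or.inl ⟨hy, hc⟩
          · exact Or.inr hy
      have ih' := ih (i + 1) (d ++ [l[i]]) u (by omega) hinv
      push_cast at ih'
      rw [ih', hdropi]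
      have hno1 : ¬ (l.count l[i] = 1) := by omega
      rw [List.filter_cons, List.filter_cons]
      simp [h2, hno1, List.append_assoc]
    · rw [if_neg (fun h => h2 (hcond.mp h))]
      have hin : l[i] ∈ l := List.getElem_mem hi
      have h1 : l.count l[i] = 1 := by
        have := List.count_pos_iff.mpr hin
        omega
      have hinv : ∀ y, y ∈ d ↔ (y ∈ l.take (i + 1) ∧ 2 ≤ l.count y) := by
        intro y
        rw [hd, htake]
        simp only [List.mem_append, List.mem_singleton]
        constructor
        · rintro ⟨hy, hc⟩
          exact ⟨Or.inl hy, hc⟩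
        · rintro ⟨hy | hy, hc⟩
          · exact ⟨hy, hc⟩
          · subst hy
            omega
      have ih' := ih (i + 1) d (u ++ [l[i]]) (by omega) hinv
      push_cast at ih'
      rw [ih', hdropi]
      rw [List.filter_cons, List.filter_cons]
      simp [h1, List.append_assoc]

theorem rem_dupli_eq (l : List Int) : rem_dupli l = rem_dupli_alt l := by
  have hcnt : ∀ x : Int,
      (l.foldl (fun d x => d.insert x (d.getD x 0 + 1)) (PySem.Dict.empty : PySem.Dict Int Int)).getD x 0
        = (l.count x : Int) := by
    intro x
    rw [getD_countLoop]
    simp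
  have hloop := loopA l l.length 0 [] [] (by omega) (by simp)
  simp only [Nat.cast_zero, List.drop_zero, List.nil_append] at hloop
  have hU : (fun x => (l.foldl (fun d x => d.insert x (d.getD x 0 + 1)) (PySem.Dict.empty : PySem.Dict Int Int)).getD x 0 == 1)
      = (fun x => decide (l.count x = 1)) := by
    funext x
    rw [hcnt]
    by_cases h : l.count x = 1
    · simp [h]
    · have h' : ((l.count x : Int) ≠ 1) := by omega
      simp [h, h']
  have hD : (fun x => decide (1 < (l.foldl (fun d x => d.insert x (d.getD x 0 + 1)) (PySem.Dict.empty : PySem.Dict Int Int)).getD x 0))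
      = (fun x => decide (2 ≤ l.count x)) := by
    funext x
    rw [hcnt]
    by_cases h : 2 ≤ l.count x
    · have h' : (1 : Int) < (l.count x : Int) := by omega
      simp [h, h']
    · have h' : ¬ ((1 : Int) < (l.count x : Int)) := by omega
      simp [h, h']
  simp only [rem_dupli, rem_dupli_alt]
  rw [hloop]
  simp only [hU, hD, ← List.head?_filter]
  cases hfl : l.filter (fun x => decide (2 ≤ l.count x)) with
  | nil => simp
  | cons h t => simp [PySem.List.pyGetD_zero_cons]

-- ===== VERDICT (by name: the statement is the Claim_ definition above) =====
theorem rem_dupli_spec : Claim_equal_rem_dupli := by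
  intro l _
  exact rem_dupli_eq l
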